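-- pv_equiv track=rewrite | github.com/Daeil-Jung/ahoy | scripts/eval_dispatch.py | check_verdict_conflict
-- ===== SOURCE A (Python) =====
-- def check_verdict_conflict(verdicts: dict[str, dict]) -> bool:
--     """Check if valid model verdicts conflict (hard pass/fail disagreement).
--
--     Returns True only when some models say pass/partial_pass and others say fail.
--     Models with verdict 'error' are excluded from the check.
--     Soft disagreements (pass vs partial_pass) do not count as conflicts.
--     """
--     valid = {k: v for k, v in verdicts.items() if v.get("verdict") not in ("error", None)}
--     if len(valid) < 2:
--         return False
--     verdict_values = {v["verdict"] for v in valid.values()}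
--     # Only conflict if there's a mix of fail and non-fail
--     has_fail = "fail" in verdict_values
--     has_non_fail = bool(verdict_values - {"fail"})
--     return has_fail and has_non_fail
-- ===== SOURCE B (Python) =====
-- def check_verdict_conflict(verdicts: dict[str, dict]) -> bool:
--     """Single early-exit pass over the verdict dicts with two flags."""
--     has_fail = False
--     has_non_fail = False
--     for v in verdicts.values():
--         s = v.get("verdict")
--         if s is None or s == "error":
--             continue
--         if s == "fail":
--             has_fail = True
--         else:
--             has_non_fail = True
--         if has_fail and has_non_fail:
--             return True
--     return False
-- ===== Notes on version B (the rewrite author's own statement) =====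
-- stated objective: simpler
-- what changed: Replaces the filtered dict comprehension, len<2 guard, set of verdict values and set-difference test by one early-exit pass keeping two boolean flags (has_fail / has_non_fail); the len<2 guard is dropped because both flags set already implies two valid verdicts.
import Mathlib
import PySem

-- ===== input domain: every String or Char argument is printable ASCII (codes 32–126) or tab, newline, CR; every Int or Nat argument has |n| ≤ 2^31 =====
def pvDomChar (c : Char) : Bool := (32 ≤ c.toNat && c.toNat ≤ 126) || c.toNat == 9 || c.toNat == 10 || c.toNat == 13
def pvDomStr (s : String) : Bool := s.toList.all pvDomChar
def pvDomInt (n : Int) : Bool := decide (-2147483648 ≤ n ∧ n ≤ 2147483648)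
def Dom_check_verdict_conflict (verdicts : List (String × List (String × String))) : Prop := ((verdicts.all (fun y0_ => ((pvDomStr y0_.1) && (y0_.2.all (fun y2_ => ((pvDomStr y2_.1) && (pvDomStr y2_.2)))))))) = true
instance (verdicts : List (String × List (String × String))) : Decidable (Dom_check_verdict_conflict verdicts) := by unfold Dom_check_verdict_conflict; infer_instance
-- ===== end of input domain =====

-- B replaces A's filter-dict + set-of-values + set-difference by one early-exit two-flag pass (simpler; same O(n) cost).


-- ===== PORT A =====
-- v.get("verdict") on an inner dict (assoc list)
def pvVget (v : List (String × String)) : Option String :=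
  PySem.Dict.get? (PySem.Dict.mk v) "verdict"

-- v.get("verdict") not in ("error", None)
def pvValidEntry (v : List (String × String)) : Bool :=
  !((pvVget v == some "error") || (pvVget v == none))

def check_verdict_conflict (verdicts : List (String × List (String × String))) : Bool :=
  let valid : PySem.Dict String (List (String × String)) :=
    PySem.Dict.ofList (verdicts.filter (fun kv => pvValidEntry kv.2))
  if valid.size < 2 then false
  else
    -- v["verdict"]: the key is present in every valid entry, so the .getD "" default is never taken
    let verdict_values : PySem.Set String :=
      PySem.Set.ofList (valid.values.map (fun v => (pvVget v).getD ""))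
    let has_fail := PySem.Set.contains verdict_values "fail"
    let has_non_fail := !(PySem.Set.diff verdict_values ["fail"]).isEmpty
    has_fail && has_non_fail

-- ===== PORT B =====
-- the for-loop of Source B: two flags, early return as soon as both are set
def pvScan : List (String × List (String × String)) → Bool → Bool → Bool
  | [], _, _ => false
  | kv :: rest, hasFail, hasNonFail =>
    match pvVget kv.2 with
    | none => pvScan rest hasFail hasNonFail
    | some s =>
      if s == "error" then pvScan rest hasFail hasNonFail
      else
        let hf := if s == "fail" then true else hasFail
        let hnf := if s == "fail" then hasNonFail else true
        if hf && hnf then true else pvScan rest hf hnf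

def check_verdict_conflict_alt (verdicts : List (String × List (String × String))) : Bool :=
  pvScan verdicts false false

-- ===== PRECONDITION & SPEC =====
-- Pre_ excludes association lists with duplicate keys: a Python dict cannot contain them, so such
-- lists represent no Python input (A's dict comprehension would silently collapse them).
def Pre_check_verdict_conflict (verdicts : List (String × List (String × String))) : Prop :=
  (verdicts.map Prod.fst).Nodup
instance (verdicts : List (String × List (String × String))) : Decidable (Pre_check_verdict_conflict verdicts) := by unfold Pre_check_verdict_conflict; infer_instance

def pvWitness_check_verdict_conflict : (List (String × List (String × String))) :=
  [("m1", [("verdict", "fail")]), ("m2", [("verdict", "pass")])]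

def Spec_check_verdict_conflict (verdicts : List (String × List (String × String))) (out : Bool) : Prop := out = check_verdict_conflict_alt verdicts
instance (verdicts : List (String × List (String × String))) (out : Bool) : Decidable (Spec_check_verdict_conflict verdicts out) := by unfold Spec_check_verdict_conflict; infer_instance

-- ===== CLAIM (what is proved, stated in full; the proofs are below) =====
def Claim_equal_check_verdict_conflict : Prop := ∀ (verdicts : List (String × List (String × String))), Dom_check_verdict_conflict verdicts → Pre_check_verdict_conflict verdicts → Spec_check_verdict_conflict verdicts (check_verdict_conflict verdicts)

-- ===== LEMMAS AND PROOFS =====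

-- the filtered verdict values both programs are about
def pvVals (l : List (String × List (String × String))) : List String :=
  (l.filter (fun kv => pvValidEntry kv.2)).map (fun kv => (pvVget kv.2).getD "")

theorem pvScan_eq (l : List (String × List (String × String))) :
    ∀ hf hnf : Bool, ¬(hf = true ∧ hnf = true) →
      pvScan l hf hnf =
        ((hf || (pvVals l).contains "fail") && (hnf || (pvVals l).any (fun x => x != "fail"))) := by
  induction l with
  | nil =>
    intro hf hnf h
    cases hf <;> cases hnf <;> simp_all [pvScan, pvVals]
  | cons kv rest ih =>
    intro hf hnf h
    cases hv : pvVget kv.2 with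
    | none =>
      have hvalid : pvValidEntry kv.2 = false := by simp [pvValidEntry, hv]
      have hvals : pvVals (kv :: rest) = pvVals rest := by
        simp [pvVals, hvalid]
      rw [hvals]
      simp only [pvScan, hv]
      exact ih hf hnf h
    | some s =>
      by_cases hs : s = "error"
      · have hvalid : pvValidEntry kv.2 = false := by simp [pvValidEntry, hv, hs]
        have hvals : pvVals (kv :: rest) = pvVals rest := by
          simp [pvVals, hvalid]
        rw [hvals]
        simp only [pvScan, hv, hs, beq_self_eq_true, if_true]
        exact ih hf hnf h
      · have hvalid : pvValidEntry kv.2 = true := by simp [pvValidEntry, hv, hs]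
        have hvals : pvVals (kv :: rest) = s :: pvVals rest := by
          simp [pvVals, hvalid, hv]
        have hserr : (s == "error") = false := by simp [hs]
        rw [hvals]
        simp only [pvScan, hv, hserr, Bool.false_eq_true, if_false,
          List.contains_cons, List.any_cons]
        by_cases hfail : s = "fail"
        · subst hfail
          cases hnf with
          | true =>
            have hhf : hf = false := by rcases h' : hf with _ | _ <;> simp_all
            subst hhf
            simp
          | false =>
            simp only [beq_self_eq_true, if_true, Bool.and_false, Bool.false_eq_true, if_false]
            rw [ih true false (by simp)]
            simp
        · have hbeq : (s == "fail") = false := by simp [hfail]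
          have hbeq2 : ("fail" == s) = false := by
            simp only [beq_eq_false_iff_ne, ne_eq]
            exact fun hh => hfail hh.symm
          cases hf with
          | true =>
            have hhnf : hnf = false := by rcases h' : hnf with _ | _ <;> simp_all
            subst hhnf
            simp only [hbeq, Bool.false_eq_true, if_false, if_true, Bool.and_true]
            simp [hbeq2]
            exact Or.inl hfail
          | false =>
            simp only [hbeq, Bool.false_eq_true, if_false, Bool.false_and]
            rw [ih false true (by simp)]
            simp [hbeq2, hfail]

theorem pvVals_two_le (V : List String) (h1 : "fail" ∈ V) (h2 : ∃ x ∈ V, x ≠ "fail") :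
    2 ≤ V.length := by
  obtain ⟨x, hx, hxne⟩ := h2
  match V, h1, hx with
  | [y], h1, hx =>
    simp at h1 hx
    exact absurd (hx.trans h1.symm) hxne
  | y :: z :: t, _, _ =>
    simp only [List.length_cons]
    omega

theorem check_verdict_conflict_eq (verdicts : List (String × List (String × String)))
    (hnd : Pre_check_verdict_conflict verdicts) :
    check_verdict_conflict verdicts =
      ((pvVals verdicts).contains "fail" && (pvVals verdicts).any (fun x => x != "fail")) := by
  unfold check_verdict_conflict
  set l := verdicts.filter (fun kv => pvValidEntry kv.2) with hl
  have hsub : l.Sublist verdicts := List.filter_sublist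
  have hndl : (l.map Prod.fst).Nodup := (hsub.map Prod.fst).nodup hnd
  have hitems : (PySem.Dict.ofList l).items = l := by
    have hfold : (PySem.Dict.ofList l : PySem.Dict String (List (String × String))) =
        l.foldl (fun d kv => d.insert kv.1 kv.2) PySem.Dict.empty := by
      simp [PySem.Dict.ofList, PySem.Dict.update]
    rw [hfold]
    have := PySem.Dict.items_foldl_insert_fresh l Prod.fst Prod.snd
      (PySem.Dict.empty : PySem.Dict String (List (String × String)))
      (by intro a _; exact PySem.Dict.contains_empty _) hndl
    simpa using this
  have hvalues : (PySem.Dict.ofList l).values.map (fun v => (pvVget v).getD "") = pvVals verdicts := by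
    simp [PySem.Dict.values, hitems, pvVals, ← hl, List.map_map, Function.comp]
  have hsize : (PySem.Dict.ofList l).size = l.length := by
    simp [PySem.Dict.size, hitems]
  simp only [hsize, hvalues]
  have hlen : (pvVals verdicts).length = l.length := by simp [pvVals, ← hl]
  by_cases hlt : l.length < 2
  · rw [if_pos hlt]
    -- the guard is redundant: both flags set would force length ≥ 2
    by_cases hfm : "fail" ∈ pvVals verdicts
    · have hany : (pvVals verdicts).any (fun x => x != "fail") = false := by
        rw [List.any_eq_false]
        intro x hx
        simp only [bne_iff_ne, ne_eq, not_not]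
        by_contra hne
        have : 2 ≤ (pvVals verdicts).length := pvVals_two_le _ hfm ⟨x, hx, hne⟩
        omega
      simp [hany]
    · have hc : (pvVals verdicts).contains "fail" = false := by
        simp [List.contains_eq_mem, hfm]
      rw [hc]
      simp
  · rw [if_neg hlt]
    congr 1
    · -- has_fail
      by_cases hfm : "fail" ∈ pvVals verdicts
      · rw [(PySem.Set.contains_iff _ _).mpr ((PySem.Set.mem_ofList _ _).mpr hfm)]
        simp [List.contains_eq_mem, hfm]
      · have h1 : PySem.Set.contains (PySem.Set.ofList (pvVals verdicts)) "fail" = false := by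
          by_contra hcon
          exact hfm ((PySem.Set.mem_ofList _ _).mp
            ((PySem.Set.contains_iff _ _).mp (by simpa using hcon)))
        rw [h1]
        simp [List.contains_eq_mem, hfm]
    · -- has_non_fail
      by_cases hnfm : ∃ x ∈ pvVals verdicts, x ≠ "fail"
      · obtain ⟨x, hx, hxne⟩ := hnfm
        have hmem : x ∈ PySem.Set.diff (PySem.Set.ofList (pvVals verdicts)) ["fail"] := by
          rw [PySem.Set.mem_diff]
          exact ⟨(PySem.Set.mem_ofList _ _).mpr hx, by simpa using hxne⟩
        have hne : (PySem.Set.diff (PySem.Set.ofList (pvVals verdicts)) ["fail"]).isEmpty = false := by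
          rcases hd : PySem.Set.diff (PySem.Set.ofList (pvVals verdicts)) ["fail"] with _ | _
          · rw [hd] at hmem; simp at hmem
          · simp
        rw [hne]
        simp only [Bool.not_false]
        exact (Eq.symm (by rw [List.any_eq_true]; exact ⟨x, hx, by simpa using hxne⟩))
      · have hempty : (PySem.Set.diff (PySem.Set.ofList (pvVals verdicts)) ["fail"]).isEmpty = true := by
          rw [List.isEmpty_iff, List.eq_nil_iff_forall_not_mem]
          intro x hx
          rw [PySem.Set.mem_diff] at hx
          exact hnfm ⟨x, (PySem.Set.mem_ofList _ _).mp hx.1, by simpa using hx.2⟩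
        have hany : (pvVals verdicts).any (fun x => x != "fail") = false := by
          rw [List.any_eq_false]
          intro x hx
          simp only [bne_iff_ne, ne_eq, not_not]
          by_contra hne
          exact hnfm ⟨x, hx, hne⟩
        rw [hempty, hany]
        simp

-- ===== VERDICT (by name: the statement is the Claim_ definition above) =====
theorem check_verdict_conflict_spec : Claim_equal_check_verdict_conflict := by
  intro verdicts _ hpre
  unfold Spec_check_verdict_conflict check_verdict_conflict_alt
  rw [check_verdict_conflict_eq verdicts hpre, pvScan_eq verdicts false false (by simp)]
  simp
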